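-- pv_equiv track=rewrite | github.com/Shreya-kk/InterviewAce | app.py | find_technical_skills
-- ===== SOURCE A (Python) =====
-- def find_technical_skills(text):
--     skills = []
--     lines = text.split('\n')
--     inside_skills_section = False
--
--     for line in lines:
--         if any(word in line.lower() for word in ["technical skill", "technical skills", "skill", "skills"]):
--             inside_skills_section = True
--         elif inside_skills_section:
--             potential_skills = line.strip().split()
--             for skill in potential_skills:
--                 if len(skill) > 1 and len(skill) <= 20 and skill not in skills:
--                     skills.append(skill)
--             if len(skills) >= 4:
--                 break
--
--     return skills[:4] if skills else None
-- ===== SOURCE B (Python) =====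
-- def find_technical_skills(text):
--     lines = text.split('\n')
--     start = next((i for i, l in enumerate(lines) if 'skill' in l.lower()), None)
--     if start is None:
--         return None
--     skills = []
--     for line in lines[start + 1:]:
--         if 'skill' in line.lower():
--             continue
--         for t in line.split():
--             if 1 < len(t) <= 20 and t not in skills:
--                 skills.append(t)
--     return skills[:4] if skills else None
-- ===== Notes on version B (the rewrite author's own statement) =====
-- stated objective: simpler
-- what changed: B first locates the header line (any line whose lowercase contains 'skill', which subsumes A's four-word any), then collects deduplicated tokens in a single pass over the remaining lines with no section flag and no early break, relying on the final [:4] truncation.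
import Mathlib
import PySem

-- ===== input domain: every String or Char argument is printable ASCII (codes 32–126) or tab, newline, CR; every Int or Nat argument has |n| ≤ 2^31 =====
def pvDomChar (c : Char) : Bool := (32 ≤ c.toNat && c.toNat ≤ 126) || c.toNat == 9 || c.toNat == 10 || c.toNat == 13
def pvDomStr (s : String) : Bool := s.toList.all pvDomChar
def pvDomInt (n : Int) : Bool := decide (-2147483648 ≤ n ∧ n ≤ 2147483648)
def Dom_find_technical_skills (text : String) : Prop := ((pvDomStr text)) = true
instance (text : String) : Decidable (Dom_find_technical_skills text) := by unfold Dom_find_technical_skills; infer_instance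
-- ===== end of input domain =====

-- B locates the skills-header line first, then collects deduplicated tokens from the
-- remaining lines in one fold without A's section flag and early break (objective: simpler).


-- ===== PORT A =====
-- shared inner token loop (identical in Source A and Source B): append each token t with
-- 1 < len(t) <= 20 and t not in skills
def pvAddTok (skills : List String) (ts : List String) : List String :=
  ts.foldl
    (fun sk t =>
      if 1 < PySem.Str.len t ∧ PySem.Str.len t ≤ 20 ∧ t ∉ sk then sk ++ [t] else sk)
    skills

-- A's header test: any(word in line.lower() for word in [...])
def pvAnyHdr (line : String) : Bool :=
  ["technical skill", "technical skills", "skill", "skills"].any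
    (fun w => PySem.Str.isIn w (PySem.Str.lower line))

-- A's for-loop with the inside_skills_section flag and the early break
def pvLoopA : List String → List String → Bool → List String
  | [], skills, _ => skills
  | l :: rest, skills, inside =>
    if pvAnyHdr l then pvLoopA rest skills true
    else if inside then
      let skills' := pvAddTok skills (PySem.Str.split₀ (PySem.Str.strip l))
      if 4 ≤ skills'.length then skills' else pvLoopA rest skills' inside
    else pvLoopA rest skills inside

def find_technical_skills (text : String) : Option (List String) :=
  -- text.split('\n'); split? is some since the separator is non-empty
  let lines := (PySem.Str.split? text "\n").getD []
  let skills := pvLoopA lines [] false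
  if skills = [] then none else some (skills.take 4)

-- ===== PORT B =====
-- B's header test: 'skill' in line.lower()
def pvHdrB (line : String) : Bool := PySem.Str.isIn "skill" (PySem.Str.lower line)

-- next((i for i, l in enumerate(lines) if ...), None), returning the lines after the header
def pvFindHeader : List String → Option (List String)
  | [] => none
  | l :: rest => if pvHdrB l then some rest else pvFindHeader rest

def find_technical_skills_alt (text : String) : Option (List String) :=
  let lines := (PySem.Str.split? text "\n").getD []
  match pvFindHeader lines with
  | none => none
  | some rest =>
    let skills := rest.foldl
      (fun sk l => if pvHdrB l then sk else pvAddTok sk (PySem.Str.split₀ l)) []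
    if skills = [] then none else some (skills.take 4)

-- ===== PRECONDITION & SPEC =====
def Spec_find_technical_skills (text : String) (out : Option (List String)) : Prop := out = find_technical_skills_alt text
instance (text : String) (out : Option (List String)) : Decidable (Spec_find_technical_skills text out) := by unfold Spec_find_technical_skills; infer_instance

-- ===== CLAIM (what is proved, stated in full; the proofs are below) =====
def Claim_equal_find_technical_skills : Prop := ∀ (text : String), Dom_find_technical_skills text → Spec_find_technical_skills text (find_technical_skills text)

-- ===== LEMMAS AND PROOFS =====

-- B's single fold over the post-header lines (abbreviation for the proofs)
def pvCollect (rest : List String) (sk : List String) : List String :=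
  rest.foldl (fun sk l => if pvHdrB l then sk else pvAddTok sk (PySem.Str.split₀ l)) sk

-- one-step unfoldings of the two loops
theorem pvCollect_cons_pos (l : String) (rs sk : List String) (h : pvHdrB l = true) :
    pvCollect (l :: rs) sk = pvCollect rs sk := by simp [pvCollect, h]

theorem pvCollect_cons_neg (l : String) (rs sk : List String) (h : pvHdrB l = false) :
    pvCollect (l :: rs) sk = pvCollect rs (pvAddTok sk (PySem.Str.split₀ l)) := by
  simp [pvCollect, h]

theorem pvLoopA_cons_pos (l : String) (rest sk : List String) (b : Bool)
    (h : pvAnyHdr l = true) :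
    pvLoopA (l :: rest) sk b = pvLoopA rest sk true := by simp [pvLoopA, h]

theorem pvLoopA_cons_neg_true (l : String) (rest sk : List String) (h : pvAnyHdr l = false) :
    pvLoopA (l :: rest) sk true =
      (let sk' := pvAddTok sk (PySem.Str.split₀ (PySem.Str.strip l));
       if 4 ≤ sk'.length then sk' else pvLoopA rest sk' true) := by simp [pvLoopA, h]

theorem pvLoopA_cons_neg_false (l : String) (rest sk : List String) (h : pvAnyHdr l = false) :
    pvLoopA (l :: rest) sk false = pvLoopA rest sk false := by simp [pvLoopA, h]

-- split₀ ignores leading whitespace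
theorem pvGo_dropWhile (s : List Char) (acc : List (List Char)) :
    PySem.Chars.split₀.go (List.dropWhile PySem.Chars.isspace s) [] acc
      = PySem.Chars.split₀.go s [] acc := by
  induction s generalizing acc with
  | nil => rfl
  | cons c rest ih =>
    by_cases h : PySem.Chars.isspace c = true
    · simp [List.dropWhile, h, PySem.Chars.split₀.go, ih]
    · simp [List.dropWhile, h, PySem.Chars.split₀.go]

-- trailing whitespace is ignored by split₀.go
theorem pvGo_all_space (sp : List Char) (hsp : ∀ c ∈ sp, PySem.Chars.isspace c = true)
    (cur : List Char) (acc : List (List Char)) :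
    PySem.Chars.split₀.go sp cur acc = PySem.Chars.split₀.go [] cur acc := by
  induction sp generalizing cur acc with
  | nil => rfl
  | cons c rest ih =>
    have hc : PySem.Chars.isspace c = true := hsp c (by simp)
    have hrest : ∀ x ∈ rest, PySem.Chars.isspace x = true := fun x hx => hsp x (by simp [hx])
    by_cases hcur : cur = []
    · subst hcur
      simp [PySem.Chars.split₀.go, hc, ih hrest]
    · simp [PySem.Chars.split₀.go, hc, hcur, ih hrest]

theorem pvGo_append_space (s sp : List Char) (hsp : ∀ c ∈ sp, PySem.Chars.isspace c = true)
    (cur : List Char) (acc : List (List Char)) :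
    PySem.Chars.split₀.go (s ++ sp) cur acc = PySem.Chars.split₀.go s cur acc := by
  induction s generalizing cur acc with
  | nil => simpa using pvGo_all_space sp hsp cur acc
  | cons c rest ih =>
    by_cases h : PySem.Chars.isspace c = true
    · by_cases hcur : cur = [] <;> simp [PySem.Chars.split₀.go, h, hcur, ih]
    · simp [PySem.Chars.split₀.go, h, ih]

theorem pvChars_split₀_strip (s : List Char) :
    PySem.Chars.split₀ (PySem.Chars.strip s) = PySem.Chars.split₀ s := by
  unfold PySem.Chars.split₀ PySem.Chars.strip PySem.Chars.rstrip PySem.Chars.lstrip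
  set t := List.dropWhile PySem.Chars.isspace s with ht
  have hsp : ∀ c ∈ (List.takeWhile PySem.Chars.isspace t.reverse).reverse,
      PySem.Chars.isspace c = true := by
    intro c hc
    exact List.mem_takeWhile_imp (by simpa using hc)
  have hdecomp : t = (List.dropWhile PySem.Chars.isspace t.reverse).reverse
      ++ (List.takeWhile PySem.Chars.isspace t.reverse).reverse := by
    conv_lhs => rw [← List.reverse_reverse t, ← List.takeWhile_append_dropWhile
      (p := PySem.Chars.isspace) (l := t.reverse), List.reverse_append]
  calc PySem.Chars.split₀.go (List.dropWhile PySem.Chars.isspace t.reverse).reverse [] []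
      = PySem.Chars.split₀.go t [] [] := by
        conv_rhs => rw [hdecomp]
        rw [pvGo_append_space _ _ hsp]
    _ = PySem.Chars.split₀.go s [] [] := pvGo_dropWhile s []

theorem pvSplit₀_strip (l : String) :
    PySem.Str.split₀ (PySem.Str.strip l) = PySem.Str.split₀ l := by
  simp [PySem.Str.split₀, pvChars_split₀_strip]

-- A's four-word any is exactly B's single 'skill' test
theorem pvHdr_eq (l : String) : pvAnyHdr l = pvHdrB l := by
  unfold pvAnyHdr pvHdrB
  simp only [List.any_cons, List.any_nil, Bool.or_false, PySem.Str.isIn_eq,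
    PySem.Str.toList_lower]
  by_cases h : ['s','k','i','l','l'] <:+: PySem.Chars.lower l.toList
  · have htrue : PySem.Chars.isIn ['s','k','i','l','l'] (PySem.Chars.lower l.toList) = true := by
      rw [PySem.Chars.isIn_iff_infix]; exact h
    simp [htrue]
  · have habs : ∀ w : List Char, (['s','k','i','l','l'] <:+: w) →
        PySem.Chars.isIn w (PySem.Chars.lower l.toList) = false := by
      intro w hw
      rw [← Bool.not_eq_true, PySem.Chars.isIn_iff_infix]
      exact fun hin => h (hw.trans hin)
    simp [habs ['t','e','c','h','n','i','c','a','l',' ','s','k','i','l','l'] (by decide),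
      habs ['t','e','c','h','n','i','c','a','l',' ','s','k','i','l','l','s'] (by decide),
      habs ['s','k','i','l','l'] (by decide),
      habs ['s','k','i','l','l','s'] (by decide)]

-- pvAddTok only appends
theorem pvAddTok_prefix (ts sk : List String) : ∃ u, pvAddTok sk ts = sk ++ u := by
  induction ts generalizing sk with
  | nil => exact ⟨[], by simp [pvAddTok]⟩
  | cons t rest ih =>
    have hstep : pvAddTok sk (t :: rest)
        = pvAddTok (if 1 < PySem.Str.len t ∧ PySem.Str.len t ≤ 20 ∧ t ∉ sk
                    then sk ++ [t] else sk) rest := rfl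
    by_cases h : 1 < PySem.Str.len t ∧ PySem.Str.len t ≤ 20 ∧ t ∉ sk
    · obtain ⟨u, hu⟩ := ih (sk ++ [t])
      exact ⟨t :: u, by rw [hstep, if_pos h, hu]; simp⟩
    · rw [hstep, if_neg h]
      exact ih sk

theorem pvCollect_prefix (rest sk : List String) : ∃ u, pvCollect rest sk = sk ++ u := by
  induction rest generalizing sk with
  | nil => exact ⟨[], by simp [pvCollect]⟩
  | cons l rs ih =>
    cases hb : pvHdrB l with
    | true =>
      obtain ⟨u, hu⟩ := ih sk
      exact ⟨u, by rw [pvCollect_cons_pos l rs sk hb, hu]⟩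
    | false =>
      obtain ⟨v, hv⟩ := pvAddTok_prefix (PySem.Str.split₀ l) sk
      obtain ⟨u, hu⟩ := ih (pvAddTok sk (PySem.Str.split₀ l))
      exact ⟨v ++ u, by rw [pvCollect_cons_neg l rs sk hb, hu, hv, List.append_assoc]⟩

-- phase 1: A's scan before the header equals B's header search
theorem pvPhase1 (lines : List String) :
    pvLoopA lines [] false
      = (match pvFindHeader lines with
         | none => []
         | some rest => pvLoopA rest [] true) := by
  induction lines with
  | nil => rfl
  | cons l rest ih =>
    cases hb : pvHdrB l with
    | true => rw [pvLoopA_cons_pos l rest [] false (by rw [pvHdr_eq, hb])]; simp [pvFindHeader, hb]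
    | false =>
      rw [pvLoopA_cons_neg_false l rest [] (by rw [pvHdr_eq, hb]), ih]
      simp [pvFindHeader, hb]

-- phase 2: B's fold extends A's break-loop result, and only when A already had ≥ 4 skills
theorem pvPhase2 (rest sk : List String) :
    ∃ u, pvCollect rest sk = pvLoopA rest sk true ++ u
      ∧ (u = [] ∨ 4 ≤ (pvLoopA rest sk true).length) := by
  induction rest generalizing sk with
  | nil => exact ⟨[], by simp [pvCollect, pvLoopA]⟩
  | cons l rs ih =>
    cases hb : pvHdrB l with
    | true =>
      obtain ⟨u, hu, hor⟩ := ih sk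
      rw [pvCollect_cons_pos l rs sk hb, pvLoopA_cons_pos l rs sk true (by rw [pvHdr_eq, hb])]
      exact ⟨u, hu, hor⟩
    | false =>
      have ha : pvAnyHdr l = false := by rw [pvHdr_eq, hb]
      rw [pvCollect_cons_neg l rs sk hb, pvLoopA_cons_neg_true l rs sk ha]
      simp only [pvSplit₀_strip]
      set sk' := pvAddTok sk (PySem.Str.split₀ l) with hsk'
      by_cases h4 : 4 ≤ sk'.length
      · obtain ⟨u, hu⟩ := pvCollect_prefix rs sk'
        exact ⟨u, by rw [if_pos h4]; exact hu, Or.inr (by rw [if_pos h4]; exact h4)⟩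
      · obtain ⟨u, hu, hor⟩ := ih sk'
        exact ⟨u, by rw [if_neg h4]; exact hu, by rw [if_neg h4]; exact hor⟩

-- ===== VERDICT (by name: the statement is the Claim_ definition above) =====
theorem find_technical_skills_spec : Claim_equal_find_technical_skills := by
  intro text _
  unfold Spec_find_technical_skills find_technical_skills find_technical_skills_alt
  set lines := (PySem.Str.split? text "\n").getD [] with hlines
  show (if pvLoopA lines [] false = [] then (none : Option (List String))
        else some ((pvLoopA lines [] false).take 4))
      = (match pvFindHeader lines with
         | none => none
         | some rest =>
           if pvCollect rest [] = [] then none else some ((pvCollect rest []).take 4))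
  rw [pvPhase1]
  cases hfind : pvFindHeader lines with
  | none => simp
  | some rest =>
    simp only
    obtain ⟨u, hu, hor⟩ := pvPhase2 rest []
    rw [hu]
    rcases hor with h | h
    · simp [h]
    · have hne : pvLoopA rest [] true ≠ [] := by
        intro h0; rw [h0] at h; simp at h
      have hne2 : pvLoopA rest [] true ++ u ≠ [] := by simp [hne]
      rw [if_neg hne, if_neg hne2]
      have : (pvLoopA rest [] true ++ u).take 4 = (pvLoopA rest [] true).take 4 := by
        rw [List.take_append_of_le_length h]
      rw [this]
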